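-- pv_equiv track=rewrite | github.com/davidlary/Pedegree | OpenBooks/core/master_curriculum_builder.py | _determine_first_level
-- ===== SOURCE A (Python) =====
-- from typing import Dict, List, Optional, Set, Tuple, Any, Union
--
-- def _determine_first_level(concept_list: List[Dict]) -> str:
--     """Determine the first educational level where this category appears."""
--     levels = []
--     for concept in concept_list:
--         source_level = concept['source_level'].lower()
--         if 'high' in source_level or 'hs' in source_level:
--             levels.append('HS-Found')
--         elif 'grad' in source_level:
--             levels.append('Grad-Intro')
--         else:
--             levels.append('UG-Intro')
--
--     # Return the most introductory level
--     level_order = {'HS-Found': 1, 'HS-Adv': 2, 'UG-Intro': 3, 'UG-Adv': 4, 'Grad-Intro': 5, 'Grad-Adv': 6}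
--     min_level = min(levels, key=lambda x: level_order.get(x, 3))
--     return min_level
-- ===== SOURCE B (Python) =====
-- def _determine_first_level(concept_list):
--     """Determine the first educational level where this category appears."""
--     found_hs = False
--     found_ug = False
--     for concept in concept_list:
--         source_level = concept['source_level'].lower()
--         if 'high' in source_level or 'hs' in source_level:
--             found_hs = True
--         elif 'grad' in source_level:
--             pass
--         else:
--             found_ug = True
--     if found_hs:
--         return 'HS-Found'
--     if found_ug:
--         return 'UG-Intro'
--     return 'Grad-Intro'
-- ===== Notes on version B (the rewrite author's own statement) =====
-- stated objective: simpler
-- what changed: Replaces the intermediate label list, the level_order dict and the keyed min() scan with one pass that sets boolean flags and a final three-way branch; Pre_ excludes the empty list (A's min() raises ValueError there, B naturally returns 'Grad-Intro') and lists with a concept missing 'source_level' (both raise KeyError).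
-- outside the precondition, e.g. on _determine_first_level([]): A raises ValueError, B returns 'Grad-Intro'
import Mathlib
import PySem

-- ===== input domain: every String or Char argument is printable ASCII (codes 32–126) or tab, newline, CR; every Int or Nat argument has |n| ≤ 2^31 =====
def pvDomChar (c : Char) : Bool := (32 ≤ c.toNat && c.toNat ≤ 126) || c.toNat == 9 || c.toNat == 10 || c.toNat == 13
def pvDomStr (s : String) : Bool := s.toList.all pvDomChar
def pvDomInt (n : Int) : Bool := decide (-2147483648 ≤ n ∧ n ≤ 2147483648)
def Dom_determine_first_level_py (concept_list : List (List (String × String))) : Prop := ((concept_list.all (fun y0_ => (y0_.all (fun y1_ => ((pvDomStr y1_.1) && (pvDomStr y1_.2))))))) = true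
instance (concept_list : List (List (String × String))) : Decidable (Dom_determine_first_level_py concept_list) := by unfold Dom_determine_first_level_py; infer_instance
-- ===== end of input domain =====

-- B replaces A's label list + keyed min() scan with a single flag-accumulating pass; same return value on Pre_ (nonempty lists with the key present).


-- ===== PORT A =====
def pvLevelOrder : PySem.Dict String Int :=
  PySem.Dict.ofList [("HS-Found", 1), ("HS-Adv", 2), ("UG-Intro", 3), ("UG-Adv", 4), ("Grad-Intro", 5), ("Grad-Adv", 6)]

-- concept['source_level'] raises KeyError when the key is missing, and min([]) raises ValueError:
-- the two `.getD ""` totalizations below are reached only outside Pre_.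
def determine_first_level_py (concept_list : List (List (String × String))) : String :=
  let levels := concept_list.foldl (fun levels concept =>
      let source_level := PySem.Str.lower ((concept.lookup "source_level").getD "")
      if PySem.Str.isIn "high" source_level || PySem.Str.isIn "hs" source_level then
        levels ++ ["HS-Found"]
      else if PySem.Str.isIn "grad" source_level then
        levels ++ ["Grad-Intro"]
      else
        levels ++ ["UG-Intro"]) []
  (PySem.List.min? levels (fun x => pvLevelOrder.getD x 3)).getD ""

-- ===== PORT B =====
-- (found_hs, found_ug); 'grad' concepts set neither flag (they are the fallback).
def determine_first_level_py_alt (concept_list : List (List (String × String))) : String :=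
  let f := concept_list.foldl (fun (f : Bool × Bool) concept =>
      let source_level := PySem.Str.lower ((concept.lookup "source_level").getD "")
      if PySem.Str.isIn "high" source_level || PySem.Str.isIn "hs" source_level then
        (true, f.2)
      else if PySem.Str.isIn "grad" source_level then
        f
      else
        (f.1, true)) (false, false)
  if f.1 then "HS-Found"
  else if f.2 then "UG-Intro"
  else "Grad-Intro"

-- ===== PRECONDITION & SPEC =====
-- Pre_ excludes exactly the inputs where Python A raises: the empty list (ValueError from min([]))
-- and lists containing a concept without the 'source_level' key (KeyError).
def Pre_determine_first_level_py (concept_list : List (List (String × String))) : Prop :=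
  concept_list ≠ [] ∧ ∀ c ∈ concept_list, ∃ p ∈ c, p.1 = "source_level"
instance (concept_list : List (List (String × String))) : Decidable (Pre_determine_first_level_py concept_list) := by unfold Pre_determine_first_level_py; infer_instance

def pvWitness_determine_first_level_py : (List (List (String × String))) :=
  [[("source_level", "High School")], [("source_level", "Graduate")]]

def Spec_determine_first_level_py (concept_list : List (List (String × String))) (out : String) : Prop := out = determine_first_level_py_alt concept_list
instance (concept_list : List (List (String × String))) (out : String) : Decidable (Spec_determine_first_level_py concept_list out) := by unfold Spec_determine_first_level_py; infer_instance

-- ===== CLAIM (what is proved, stated in full; the proofs are below) =====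
def Claim_equal_determine_first_level_py : Prop := ∀ (concept_list : List (List (String × String))), Dom_determine_first_level_py concept_list → Pre_determine_first_level_py concept_list → Spec_determine_first_level_py concept_list (determine_first_level_py concept_list)

-- ===== LEMMAS AND PROOFS =====

-- the per-concept label both programs branch on
def pvCls (concept : List (String × String)) : String :=
  let source_level := PySem.Str.lower ((concept.lookup "source_level").getD "")
  if PySem.Str.isIn "high" source_level || PySem.Str.isIn "hs" source_level then "HS-Found"
  else if PySem.Str.isIn "grad" source_level then "Grad-Intro"
  else "UG-Intro"

-- B's flag-update step (definitionally the lambda in determine_first_level_py_alt)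
def pvBStep (f : Bool × Bool) (concept : List (String × String)) : Bool × Bool :=
  let source_level := PySem.Str.lower ((concept.lookup "source_level").getD "")
  if PySem.Str.isIn "high" source_level || PySem.Str.isIn "hs" source_level then
    (true, f.2)
  else if PySem.Str.isIn "grad" source_level then
    f
  else
    (f.1, true)

lemma pvA_levels (l : List (List (String × String))) (acc : List String) :
    l.foldl (fun levels concept =>
      let source_level := PySem.Str.lower ((concept.lookup "source_level").getD "")
      if PySem.Str.isIn "high" source_level || PySem.Str.isIn "hs" source_level then
        levels ++ ["HS-Found"]
      else if PySem.Str.isIn "grad" source_level then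
        levels ++ ["Grad-Intro"]
      else
        levels ++ ["UG-Intro"]) acc = acc ++ l.map pvCls := by
  induction l generalizing acc with
  | nil => simp
  | cons c t ih =>
    simp only [List.foldl_cons, List.map_cons, pvCls]
    rw [ih]
    split_ifs <;> simp

lemma pvMin?_cons (key : String → Int) (x : String) (xs : List String) :
    PySem.List.min? (x :: xs) key =
      (match PySem.List.min? xs key with
        | none => some x
        | some m => if key m < key x then some m else some x) := by
  induction xs generalizing x with
  | nil => rfl
  | cons y ys ih =>
    have hstep : PySem.List.min? (x :: y :: ys) key
        = PySem.List.min? ((if key y < key x then y else x) :: ys) key := by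
      simp only [PySem.List.min?, List.foldl_cons]
      split_ifs <;> rfl
    rw [hstep]
    by_cases hxy : key y < key x <;>
      simp only [hxy, if_true, if_false, ih] <;>
      cases hM : PySem.List.min? ys key <;>
      simp only [] <;>
      split_ifs <;> simp_all <;> omega

lemma pvK1 : pvLevelOrder.getD "HS-Found" 3 = 1 := by decide
lemma pvK3 : pvLevelOrder.getD "UG-Intro" 3 = 3 := by decide
lemma pvK5 : pvLevelOrder.getD "Grad-Intro" 3 = 5 := by decide

lemma pvMinChar (xs : List String)
    (hx : ∀ s ∈ xs, s = "HS-Found" ∨ s = "UG-Intro" ∨ s = "Grad-Intro") :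
    PySem.List.min? xs (fun x => pvLevelOrder.getD x 3) =
      (if "HS-Found" ∈ xs then some "HS-Found"
       else if "UG-Intro" ∈ xs then some "UG-Intro"
       else if "Grad-Intro" ∈ xs then some "Grad-Intro"
       else none) := by
  induction xs with
  | nil => simp [PySem.List.min?]
  | cons x t ih =>
    rw [pvMin?_cons, ih (fun s hs => hx s (List.mem_cons_of_mem x hs))]
    rcases hx x List.mem_cons_self with hx1 | hx1 | hx1 <;> subst hx1 <;>
      by_cases h1 : "HS-Found" ∈ t <;> by_cases h2 : "UG-Intro" ∈ t <;>
      by_cases h3 : "Grad-Intro" ∈ t <;>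
      simp [h1, h2, h3, pvK1, pvK3, pvK5]

lemma pvFlags (l : List (List (String × String))) (s : Bool × Bool) :
    l.foldl pvBStep s =
      (s.1 || decide ("HS-Found" ∈ l.map pvCls),
       s.2 || decide ("UG-Intro" ∈ l.map pvCls)) := by
  induction l generalizing s with
  | nil => simp
  | cons c t ih =>
    simp only [List.foldl_cons, List.map_cons, pvBStep, pvCls]
    split_ifs <;> rw [ih] <;> simp [List.mem_cons]

lemma pvTri (c : List (String × String)) :
    pvCls c = "HS-Found" ∨ pvCls c = "UG-Intro" ∨ pvCls c = "Grad-Intro" := by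
  simp only [pvCls]
  split_ifs <;> simp

-- ===== VERDICT (by name: the statement is the Claim_ definition above) =====
theorem determine_first_level_py_spec : Claim_equal_determine_first_level_py := by
  intro l _ hpre
  obtain ⟨hne, -⟩ := hpre
  unfold Spec_determine_first_level_py determine_first_level_py determine_first_level_py_alt
  rw [pvA_levels]
  simp only [List.nil_append]
  rw [pvMinChar (l.map pvCls)
        (by intro s hs
            obtain ⟨c, -, rfl⟩ := List.mem_map.1 hs
            exact pvTri c)]
  rw [show (fun (f : Bool × Bool) (concept : List (String × String)) =>
      let source_level := PySem.Str.lower ((concept.lookup "source_level").getD "")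
      if PySem.Str.isIn "high" source_level || PySem.Str.isIn "hs" source_level then
        (true, f.2)
      else if PySem.Str.isIn "grad" source_level then
        f
      else
        (f.1, true)) = pvBStep from rfl]
  rw [pvFlags l (false, false)]
  cases l with
  | nil => exact absurd rfl hne
  | cons c t =>
    have hmem : pvCls c ∈ (c :: t).map pvCls := List.mem_map.2 ⟨c, List.mem_cons_self, rfl⟩
    simp only [Bool.false_or, decide_eq_true_eq]
    by_cases h1 : "HS-Found" ∈ (c :: t).map pvCls
    · rw [if_pos h1, if_pos h1]
      rfl
    · rw [if_neg h1, if_neg h1]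
      by_cases h2 : "UG-Intro" ∈ (c :: t).map pvCls
      · rw [if_pos h2, if_pos h2]
        rfl
      · rw [if_neg h2, if_neg h2]
        have h3 : "Grad-Intro" ∈ (c :: t).map pvCls := by
          rcases pvTri c with hx | hx | hx
          · rw [hx] at hmem; exact absurd hmem h1
          · rw [hx] at hmem; exact absurd hmem h2
          · rw [hx] at hmem; exact hmem
        rw [if_pos h3]
        rfl
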